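-- pv_equiv track=rewrite | github.com/BoongVHB/FindVietnameseletter | FindVietNameseletter.py | find_vietnamese_letters
-- ===== SOURCE A (Python) =====
-- def find_vietnamese_letters(input_str):
--     vietnamese_letters = {
--         'aw': 'ă',
--         'aa': 'â',
--         'dd': 'đ',
--         'ee': 'ê',
--         'oo': 'ô',
--         'ow': 'ơ',
--         'w': 'ư'
--     }
--
--     count = 0
--     vietnamese_chars = []
--
--     i = 0
--     while i < len(input_str):
--         found = False
--         for key in vietnamese_letters:
--             if input_str[i:i+len(key)] == key:
--                 count += 1
--                 vietnamese_chars.append(vietnamese_letters[key])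
--                 i += len(key)
--                 found = True
--                 break
--         if not found:
--             i += 1
--
--     return count, vietnamese_chars
-- ===== SOURCE B (Python) =====
-- def find_vietnamese_letters(input_str):
--     # Finite-automaton pass: no slicing, no lookahead.  The state is the one
--     # pending first character of a possible digraph; each input character
--     # drives a transition that may emit a letter.
--     digraph = {('a', 'w'): 'ă', ('a', 'a'): 'â', ('d', 'd'): 'đ',
--                ('e', 'e'): 'ê', ('o', 'o'): 'ô', ('o', 'w'): 'ơ'}
--     out = []
--     pending = None
--     for c in input_str:
--         if pending is not None and (pending, c) in digraph:
--             out.append(digraph[(pending, c)])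
--             pending = None
--         elif c in 'adeo':
--             pending = c
--         else:
--             if c == 'w':
--                 out.append('ư')
--             pending = None
--     return len(out), out
-- ===== Notes on version B (the rewrite author's own statement) =====
-- stated objective: faster
-- what changed: A's index-based while loop that at each position builds slices and compares them against all seven keys is replaced by a character-at-a-time finite automaton: a single for-loop over characters with a one-character pending state and a transition table keyed by (pending, current) pairs, with no slicing or lookahead.
import Mathlib
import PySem

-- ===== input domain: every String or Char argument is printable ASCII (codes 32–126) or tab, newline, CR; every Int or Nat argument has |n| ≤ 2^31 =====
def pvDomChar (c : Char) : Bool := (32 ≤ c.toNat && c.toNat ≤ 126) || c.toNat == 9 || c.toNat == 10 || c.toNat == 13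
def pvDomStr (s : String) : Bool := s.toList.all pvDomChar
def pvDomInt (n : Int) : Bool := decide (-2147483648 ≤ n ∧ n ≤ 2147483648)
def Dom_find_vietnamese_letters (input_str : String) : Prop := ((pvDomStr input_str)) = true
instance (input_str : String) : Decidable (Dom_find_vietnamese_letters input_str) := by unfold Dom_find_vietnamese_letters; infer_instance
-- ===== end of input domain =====

-- B replaces A's slice-and-compare scan over all seven keys at each index by a
-- character-at-a-time finite automaton with a one-character pending state (alternative).

-- ===== PORT A =====
-- A's dict of seven (key, letter) pairs, in insertion order; keys as char lists
-- because A only ever compares a key against a slice of the input.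
def pvKeysA : List (List Char × String) :=
  [(['a','w'], "ă"), (['a','a'], "â"), (['d','d'], "đ"), (['e','e'], "ê"),
   (['o','o'], "ô"), (['o','w'], "ơ"), (['w'], "ư")]

-- the inner loop: 'for key in vietnamese_letters: if input_str[i:i+len(key)] == key: … break'
def pvInnerA (rest : List Char) : List (List Char × String) → Option (List Char × String)
  | [] => none
  | (k, v) :: ks => if rest.take k.length = k then some (k, v) else pvInnerA rest ks

lemma pvInnerA_mem {rest : List Char} {ks : List (List Char × String)} {k : List Char}
    {v : String} (h : pvInnerA rest ks = some (k, v)) : (k, v) ∈ ks := by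
  induction ks with
  | nil => simp [pvInnerA] at h
  | cons p ps ih =>
    obtain ⟨k', v'⟩ := p
    by_cases hc : rest.take k'.length = k'
    · simp [pvInnerA, hc] at h
      simp [h.1, h.2]
    · simp [pvInnerA, hc] at h
      exact List.mem_cons_of_mem _ (ih h)

-- the while loop; state = (suffix of input_str from i, count, vietnamese_chars)
def pvLoopA : List Char → Int → List String → Int × List String
  | [], count, acc => (count, acc)
  | c :: cs, count, acc =>
    match h : pvInnerA (c :: cs) pvKeysA with
    | some (k, v) => pvLoopA ((c :: cs).drop k.length) (count + 1) (acc ++ [v])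
    | none => pvLoopA cs count acc
termination_by rest _ _ => rest.length
decreasing_by
  · have hk : (k, v) ∈ pvKeysA := pvInnerA_mem h
    have hne : k ≠ [] := by fin_cases hk <;> simp
    have h1 : 1 ≤ k.length := by
      cases k with
      | nil => exact absurd rfl hne
      | cons _ _ => simp
    simp
    omega
  · simp

def find_vietnamese_letters (input_str : String) : Int × List String :=
  pvLoopA input_str.toList 0 []

-- ===== PORT B =====
-- B's transition table: the six digraphs keyed by the (pending, current) pair.
def pvDgB : PySem.Dict (Char × Char) String :=
  PySem.Dict.ofList
    [(('a','w'), "ă"), (('a','a'), "â"), (('d','d'), "đ"),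
     (('e','e'), "ê"), (('o','o'), "ô"), (('o','w'), "ơ")]

-- the 'elif c in 'adeo': … else: …' tail of B's loop body
def pvFreshB (c : Char) (out : List String) : Option Char × List String :=
  if "adeo".toList.contains c then (some c, out)
  else if c = 'w' then (none, out ++ ["ư"]) else (none, out)

-- one iteration of B's for-loop; state = (pending, out)
def pvStepB (st : Option Char × List String) (c : Char) : Option Char × List String :=
  match st with
  | (some p, out) =>
    match pvDgB.get? (p, c) with
    | some v => (none, out ++ [v])
    | none => pvFreshB c out
  | (none, out) => pvFreshB c out

def find_vietnamese_letters_alt (input_str : String) : Int × List String :=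
  let out := (input_str.toList.foldl pvStepB (none, [])).2
  ((out.length : Int), out)

-- ===== PRECONDITION & SPEC =====
def Spec_find_vietnamese_letters (input_str : String) (out : Int × List String) : Prop := out = find_vietnamese_letters_alt input_str
instance (input_str : String) (out : Int × List String) : Decidable (Spec_find_vietnamese_letters input_str out) := by unfold Spec_find_vietnamese_letters; infer_instance

-- ===== CLAIM (what is proved, stated in full; the proofs are below) =====
def Claim_equal_find_vietnamese_letters : Prop := ∀ (input_str : String), Dom_find_vietnamese_letters input_str → Spec_find_vietnamese_letters input_str (find_vietnamese_letters input_str)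

-- ===== LEMMAS AND PROOFS =====

-- B's output from the automaton's start state on a suffix of the input
def pvRunB (rest : List Char) : List String := (rest.foldl pvStepB (none, [])).2

-- A's inner key scan, written out as the seven tests it performs
lemma pvInnerA_eq (rest : List Char) : pvInnerA rest pvKeysA =
    if rest.take 2 = ['a','w'] then some (['a','w'], "ă")
    else if rest.take 2 = ['a','a'] then some (['a','a'], "â")
    else if rest.take 2 = ['d','d'] then some (['d','d'], "đ")
    else if rest.take 2 = ['e','e'] then some (['e','e'], "ê")
    else if rest.take 2 = ['o','o'] then some (['o','o'], "ô")
    else if rest.take 2 = ['o','w'] then some (['o','w'], "ơ")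
    else if rest.take 1 = ['w'] then some (['w'], "ư")
    else none := rfl

lemma pvLoopA_cons (c : Char) (cs : List Char) (count : Int) (acc : List String) :
    pvLoopA (c :: cs) count acc =
      match pvInnerA (c :: cs) pvKeysA with
      | some (k, v) => pvLoopA ((c :: cs).drop k.length) (count + 1) (acc ++ [v])
      | none => pvLoopA cs count acc := by
  simp only [pvLoopA]
  split <;> simp_all

-- B's transition table, written out as the six pair tests it performs
lemma pvDgB_get (p c : Char) : pvDgB.get? (p, c) =
    if p = 'a' ∧ c = 'w' then some "ă" else if p = 'a' ∧ c = 'a' then some "â"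
    else if p = 'd' ∧ c = 'd' then some "đ" else if p = 'e' ∧ c = 'e' then some "ê"
    else if p = 'o' ∧ c = 'o' then some "ô" else if p = 'o' ∧ c = 'w' then some "ơ"
    else none := by
  have hd : pvDgB = PySem.Dict.mk
      [(('a','w'), "ă"), (('a','a'), "â"), (('d','d'), "đ"),
       (('e','e'), "ê"), (('o','o'), "ô"), (('o','w'), "ơ")] := by rfl
  rw [hd]
  simp only [PySem.Dict.get?_mk_cons, beq_iff_eq, Prod.mk.injEq]
  have hlast : PySem.Dict.get? (PySem.Dict.mk ([] : List ((Char × Char) × String))) (p, c) = none := by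
    simp [PySem.Dict.get?]
  rw [hlast]
  split_ifs with h1 h2 h3 h4 h5 h6 <;>
    simp_all [eq_comm]

-- B's step only ever appends to the out component of the state
lemma pvStepB_acc (p : Option Char) (out : List String) (c : Char) :
    pvStepB (p, out) c = ((pvStepB (p, []) c).1, out ++ (pvStepB (p, []) c).2) := by
  cases p with
  | none => simp only [pvStepB, pvFreshB]; split_ifs <;> simp
  | some q =>
    simp only [pvStepB]
    cases pvDgB.get? (q, c) with
    | some v => simp
    | none => simp only [pvFreshB]; split_ifs <;> simp

lemma pvFoldB_acc (l : List Char) : ∀ (p : Option Char) (out : List String),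
    l.foldl pvStepB (p, out) = ((l.foldl pvStepB (p, [])).1, out ++ (l.foldl pvStepB (p, [])).2) := by
  induction l with
  | nil => intro p out; simp
  | cons c cs ih =>
    intro p out
    simp only [List.foldl_cons]
    rw [pvStepB_acc, ih ((pvStepB (p, []) c).1) (out ++ (pvStepB (p, []) c).2),
        ih ((pvStepB (p, []) c).1) ((pvStepB (p, []) c).2)]
    simp

-- the run after an emitting step, and after a step that leaves the fresh state
lemma pvRunB_emit {c : Char} (cs : List Char) {v : String}
    (h : pvStepB (none, []) c = (none, [v])) : pvRunB (c :: cs) = v :: pvRunB cs := by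
  simp only [pvRunB, List.foldl_cons, h]
  rw [pvFoldB_acc]
  simp

lemma pvRunB_skip {c : Char} (cs : List Char)
    (h : pvStepB (none, []) c = (none, [])) : pvRunB (c :: cs) = pvRunB cs := by
  simp only [pvRunB, List.foldl_cons, h]

lemma pvRunB_pend {c1 : Char} (c2 : Char) (cs : List Char)
    (h : pvStepB (none, []) c1 = (some c1, [])) :
    pvRunB (c1 :: c2 :: cs) = (cs.foldl pvStepB (pvStepB (some c1, []) c2)).2 := by
  simp only [pvRunB, List.foldl_cons, h]

lemma pvTail_emit {c1 c2 : Char} (cs : List Char) {v : String}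
    (h : pvStepB (some c1, []) c2 = (none, [v])) :
    (cs.foldl pvStepB (pvStepB (some c1, []) c2)).2 = v :: pvRunB cs := by
  rw [h, pvFoldB_acc]
  simp [pvRunB]

lemma pvTail_fresh {c1 c2 : Char} (cs : List Char)
    (h : pvDgB.get? (c1, c2) = none) :
    (cs.foldl pvStepB (pvStepB (some c1, []) c2)).2 = pvRunB (c2 :: cs) := by
  have : pvStepB (some c1, []) c2 = pvStepB (none, []) c2 := by
    simp [pvStepB, h]
  rw [this]
  simp [pvRunB, List.foldl_cons]

-- the main correspondence: A's positioned loop computes B's automaton output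
lemma pvMain : ∀ (n : Nat) (rest : List Char), rest.length ≤ n →
    ∀ (count : Int) (acc : List String),
    pvLoopA rest count acc = (count + ((pvRunB rest).length : Int), acc ++ pvRunB rest) := by
  intro n
  induction n with
  | zero =>
    intro rest h count acc
    cases rest with
    | nil => simp [pvLoopA, pvRunB]
    | cons c cs => simp at h
  | succ n ih =>
    intro rest h count acc
    match rest with
    | [] => simp [pvLoopA, pvRunB]
    | [c] =>
      rw [pvLoopA_cons, pvInnerA_eq]
      simp only [List.take_succ_cons, List.take_nil]
      by_cases hw : c = 'w'
      · subst hw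
        have : pvRunB ['w'] = ["ư"] := by decide
        simp [pvLoopA, this]
      · have : pvRunB [c] = [] := by
          simp only [pvRunB, List.foldl_cons, List.foldl_nil, pvStepB, pvFreshB]
          split_ifs <;> simp_all
        simp [pvLoopA, hw, this]
    | c1 :: c2 :: cs =>
      have hcs : cs.length ≤ n := by simp at h; omega
      have hc2 : (c2 :: cs).length ≤ n := by simp at h ⊢; omega
      rw [pvLoopA_cons, pvInnerA_eq]
      simp only [List.take_succ_cons, List.take_zero]
      by_cases ha : c1 = 'a'
      · subst ha
        have hp : pvStepB (none, []) 'a' = (some 'a', []) := by decide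
        by_cases h2 : c2 = 'w'
        · subst h2
          rw [pvRunB_pend _ _ hp, pvTail_emit cs (v := "ă") (by decide), if_pos (by simp)]
          change pvLoopA cs (count + 1) (acc ++ ["ă"]) = _
          rw [ih cs hcs]
          simp; omega
        · by_cases h3 : c2 = 'a'
          · subst h3
            rw [pvRunB_pend _ _ hp, pvTail_emit cs (v := "â") (by decide)]
            rw [if_neg (by simp [h2]), if_pos (by simp)]
            change pvLoopA cs (count + 1) (acc ++ ["â"]) = _
            rw [ih cs hcs]
            simp; omega
          · rw [pvRunB_pend _ _ hp, pvTail_fresh cs (by rw [pvDgB_get]; simp [h2, h3])]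
            simp only [if_neg (by simp [h2] : ¬ ([('a' : Char), c2] = ['a','w'])),
                       if_neg (by simp [h3] : ¬ ([('a' : Char), c2] = ['a','a'])),
                       if_neg (by simp : ¬ ([('a' : Char), c2] = ['d','d'])),
                       if_neg (by simp : ¬ ([('a' : Char), c2] = ['e','e'])),
                       if_neg (by simp : ¬ ([('a' : Char), c2] = ['o','o'])),
                       if_neg (by simp : ¬ ([('a' : Char), c2] = ['o','w'])),
                       if_neg (by simp : ¬ ([('a' : Char)] = ['w']))]
            exact ih (c2 :: cs) hc2 count acc
      by_cases hd : c1 = 'd'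
      · subst hd
        have hp : pvStepB (none, []) 'd' = (some 'd', []) := by decide
        by_cases h2 : c2 = 'd'
        · subst h2
          rw [pvRunB_pend _ _ hp, pvTail_emit cs (v := "đ") (by decide)]
          rw [if_neg (by simp), if_neg (by simp), if_pos (by simp)]
          change pvLoopA cs (count + 1) (acc ++ ["đ"]) = _
          rw [ih cs hcs]
          simp; omega
        · rw [pvRunB_pend _ _ hp, pvTail_fresh cs (by rw [pvDgB_get]; simp [h2])]
          simp only [if_neg (by simp : ¬ ([('d' : Char), c2] = ['a','w'])),
                     if_neg (by simp : ¬ ([('d' : Char), c2] = ['a','a'])),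
                     if_neg (by simp [h2] : ¬ ([('d' : Char), c2] = ['d','d'])),
                     if_neg (by simp : ¬ ([('d' : Char), c2] = ['e','e'])),
                     if_neg (by simp : ¬ ([('d' : Char), c2] = ['o','o'])),
                     if_neg (by simp : ¬ ([('d' : Char), c2] = ['o','w'])),
                     if_neg (by simp : ¬ ([('d' : Char)] = ['w']))]
          exact ih (c2 :: cs) hc2 count acc
      by_cases he : c1 = 'e'
      · subst he
        have hp : pvStepB (none, []) 'e' = (some 'e', []) := by decide
        by_cases h2 : c2 = 'e'
        · subst h2
          rw [pvRunB_pend _ _ hp, pvTail_emit cs (v := "ê") (by decide)]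
          rw [if_neg (by simp), if_neg (by simp), if_neg (by simp), if_pos (by simp)]
          change pvLoopA cs (count + 1) (acc ++ ["ê"]) = _
          rw [ih cs hcs]
          simp; omega
        · rw [pvRunB_pend _ _ hp, pvTail_fresh cs (by rw [pvDgB_get]; simp [h2])]
          simp only [if_neg (by simp : ¬ ([('e' : Char), c2] = ['a','w'])),
                     if_neg (by simp : ¬ ([('e' : Char), c2] = ['a','a'])),
                     if_neg (by simp : ¬ ([('e' : Char), c2] = ['d','d'])),
                     if_neg (by simp [h2] : ¬ ([('e' : Char), c2] = ['e','e'])),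
                     if_neg (by simp : ¬ ([('e' : Char), c2] = ['o','o'])),
                     if_neg (by simp : ¬ ([('e' : Char), c2] = ['o','w'])),
                     if_neg (by simp : ¬ ([('e' : Char)] = ['w']))]
          exact ih (c2 :: cs) hc2 count acc
      by_cases ho : c1 = 'o'
      · subst ho
        have hp : pvStepB (none, []) 'o' = (some 'o', []) := by decide
        by_cases h2 : c2 = 'o'
        · subst h2
          rw [pvRunB_pend _ _ hp, pvTail_emit cs (v := "ô") (by decide)]
          rw [if_neg (by simp), if_neg (by simp), if_neg (by simp), if_neg (by simp),
              if_pos (by simp)]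
          change pvLoopA cs (count + 1) (acc ++ ["ô"]) = _
          rw [ih cs hcs]
          simp; omega
        · by_cases h3 : c2 = 'w'
          · subst h3
            rw [pvRunB_pend _ _ hp, pvTail_emit cs (v := "ơ") (by decide)]
            rw [if_neg (by simp), if_neg (by simp), if_neg (by simp), if_neg (by simp),
                if_neg (by simp), if_pos (by simp)]
            change pvLoopA cs (count + 1) (acc ++ ["ơ"]) = _
            rw [ih cs hcs]
            simp; omega
          · rw [pvRunB_pend _ _ hp, pvTail_fresh cs (by rw [pvDgB_get]; simp [h2, h3])]
            simp only [if_neg (by simp : ¬ ([('o' : Char), c2] = ['a','w'])),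
                       if_neg (by simp : ¬ ([('o' : Char), c2] = ['a','a'])),
                       if_neg (by simp : ¬ ([('o' : Char), c2] = ['d','d'])),
                       if_neg (by simp : ¬ ([('o' : Char), c2] = ['e','e'])),
                       if_neg (by simp [h2] : ¬ ([('o' : Char), c2] = ['o','o'])),
                       if_neg (by simp [h3] : ¬ ([('o' : Char), c2] = ['o','w'])),
                       if_neg (by simp : ¬ ([('o' : Char)] = ['w']))]
            exact ih (c2 :: cs) hc2 count acc
      by_cases hw : c1 = 'w'
      · subst hw
        rw [pvRunB_emit (c2 :: cs) (v := "ư") (by decide)]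
        rw [if_neg (by simp), if_neg (by simp), if_neg (by simp), if_neg (by simp),
            if_neg (by simp), if_neg (by simp), if_pos (by simp)]
        change pvLoopA (c2 :: cs) (count + 1) (acc ++ ["ư"]) = _
        rw [ih (c2 :: cs) hc2]
        simp; omega
      · -- c1 matches no key at all
        have hskip : pvStepB (none, []) c1 = (none, []) := by
          simp [pvStepB, pvFreshB, List.contains_eq_mem, ha, hd, he, ho, hw]
        rw [pvRunB_skip (c2 :: cs) hskip]
        simp only [if_neg (by simp [ha] : ¬ ([c1, c2] = ['a','w'])),
                   if_neg (by simp [ha] : ¬ ([c1, c2] = ['a','a'])),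
                   if_neg (by simp [hd] : ¬ ([c1, c2] = ['d','d'])),
                   if_neg (by simp [he] : ¬ ([c1, c2] = ['e','e'])),
                   if_neg (by simp [ho] : ¬ ([c1, c2] = ['o','o'])),
                   if_neg (by simp [ho] : ¬ ([c1, c2] = ['o','w'])),
                   if_neg (by simp [hw] : ¬ ([c1] = ['w']))]
        exact ih (c2 :: cs) hc2 count acc

-- ===== VERDICT (by name: the statement is the Claim_ definition above) =====
theorem find_vietnamese_letters_spec : Claim_equal_find_vietnamese_letters := by
  intro s _
  show _ = _
  rw [find_vietnamese_letters, find_vietnamese_letters_alt,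
      pvMain s.toList.length s.toList le_rfl]
  simp [pvRunB]
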